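-- pv_equiv track=rewrite | github.com/Eric-Chung-0511/Learning-Record | Data Science Projects/VisionScout/Deployment/places365_model.py | _infer_scene_attributes
-- ===== SOURCE A (Python) =====
-- from typing import Dict, List, Tuple, Optional, Any
--
-- def _infer_scene_attributes(scene_class: str) -> List[str]:
--     """
--     Infer basic scene attributes from Places365 class.
--
--     Args:
--         scene_class: Places365 scene class name
--
--     Returns:
--         List[str]: Inferred scene attributes
--     """
--     attributes = []
--     scene_lower = scene_class.lower()
--
--     # Lighting attributes
--     if any(keyword in scene_lower for keyword in ['outdoor', 'street', 'park', 'beach']):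
--         attributes.append('natural_lighting')
--     elif any(keyword in scene_lower for keyword in ['indoor', 'room', 'office']):
--         attributes.append('artificial_lighting')
--
--     # Functional attributes
--     if any(keyword in scene_lower for keyword in ['commercial', 'store', 'shop', 'restaurant']):
--         attributes.append('commercial')
--     elif any(keyword in scene_lower for keyword in ['residential', 'home', 'living', 'bedroom']):
--         attributes.append('residential')
--     elif any(keyword in scene_lower for keyword in ['office', 'conference', 'meeting']):
--         attributes.append('workplace')
--     elif any(keyword in scene_lower for keyword in ['recreation', 'park', 'playground', 'stadium']):
--         attributes.append('recreational')
--     elif any(keyword in scene_lower for keyword in ['educational', 'school', 'library', 'classroom']):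
--         attributes.append('educational')
--
--     # Spatial attributes
--     if any(keyword in scene_lower for keyword in ['open', 'field', 'plaza', 'stadium']):
--         attributes.append('open_space')
--     elif any(keyword in scene_lower for keyword in ['enclosed', 'room', 'interior']):
--         attributes.append('enclosed_space')
--
--     return attributes
-- ===== SOURCE B (Python) =====
-- from typing import List
--
-- # Flat priority-ordered rule list: (group_id, keywords, attribute).
-- _RULES = [
--     (0, ['outdoor', 'street', 'park', 'beach'], 'natural_lighting'),
--     (0, ['indoor', 'room', 'office'], 'artificial_lighting'),
--     (1, ['commercial', 'store', 'shop', 'restaurant'], 'commercial'),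
--     (1, ['residential', 'home', 'living', 'bedroom'], 'residential'),
--     (1, ['office', 'conference', 'meeting'], 'workplace'),
--     (1, ['recreation', 'park', 'playground', 'stadium'], 'recreational'),
--     (1, ['educational', 'school', 'library', 'classroom'], 'educational'),
--     (2, ['open', 'field', 'plaza', 'stadium'], 'open_space'),
--     (2, ['enclosed', 'room', 'interior'], 'enclosed_space'),
-- ]
--
-- def _infer_scene_attributes(scene_class: str) -> List[str]:
--     # Stage 1: collect ALL matching rules (no short-circuiting / no elif logic).
--     scene_lower = scene_class.lower()
--     matched = [(g, attr) for g, kws, attr in _RULES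
--                if any(k in scene_lower for k in kws)]
--     # Stage 2: deduplicate by group, keeping the highest-priority match per group.
--     seen = set()
--     attributes = []
--     for g, attr in matched:
--         if g not in seen:
--             seen.add(g)
--             attributes.append(attr)
--     return attributes
-- ===== Notes on version B (the rewrite author's own statement) =====
-- stated objective: alternative
-- what changed: Instead of four short-circuiting if/elif ladders, B first collects ALL matching rules from one flat priority-ordered rule list (no elif / no break), then a second dedupe pass with a seen-set keeps only the highest-priority match per group.
import Mathlib
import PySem

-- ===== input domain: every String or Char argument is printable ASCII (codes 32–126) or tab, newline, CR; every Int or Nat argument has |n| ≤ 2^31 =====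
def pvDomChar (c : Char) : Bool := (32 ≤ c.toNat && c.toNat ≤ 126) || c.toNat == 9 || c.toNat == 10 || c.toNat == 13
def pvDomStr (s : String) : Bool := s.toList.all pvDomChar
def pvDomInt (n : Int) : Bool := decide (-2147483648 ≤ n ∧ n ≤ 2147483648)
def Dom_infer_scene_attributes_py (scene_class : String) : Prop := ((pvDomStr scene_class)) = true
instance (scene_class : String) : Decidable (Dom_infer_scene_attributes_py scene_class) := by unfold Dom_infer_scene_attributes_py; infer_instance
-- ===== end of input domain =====

-- B collects all matching rules from one flat priority-ordered rule list and then deduplicates by group with a seen-set (objective: alternative two-stage decomposition, no elif short-circuiting).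


-- ===== PORT A =====
def infer_scene_attributes_py (scene_class : String) : List String :=
  let scene_lower := PySem.Str.lower scene_class
  let attributes : List String := []
  let attributes :=
    if ["outdoor", "street", "park", "beach"].any (fun k => PySem.Str.isIn k scene_lower) then
      attributes ++ ["natural_lighting"]
    else if ["indoor", "room", "office"].any (fun k => PySem.Str.isIn k scene_lower) then
      attributes ++ ["artificial_lighting"]
    else attributes
  let attributes :=
    if ["commercial", "store", "shop", "restaurant"].any (fun k => PySem.Str.isIn k scene_lower) then
      attributes ++ ["commercial"]
    else if ["residential", "home", "living", "bedroom"].any (fun k => PySem.Str.isIn k scene_lower) then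
      attributes ++ ["residential"]
    else if ["office", "conference", "meeting"].any (fun k => PySem.Str.isIn k scene_lower) then
      attributes ++ ["workplace"]
    else if ["recreation", "park", "playground", "stadium"].any (fun k => PySem.Str.isIn k scene_lower) then
      attributes ++ ["recreational"]
    else if ["educational", "school", "library", "classroom"].any (fun k => PySem.Str.isIn k scene_lower) then
      attributes ++ ["educational"]
    else attributes
  let attributes :=
    if ["open", "field", "plaza", "stadium"].any (fun k => PySem.Str.isIn k scene_lower) then
      attributes ++ ["open_space"]
    else if ["enclosed", "room", "interior"].any (fun k => PySem.Str.isIn k scene_lower) then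
      attributes ++ ["enclosed_space"]
    else attributes
  attributes

-- ===== PORT B =====
-- flat priority-ordered rule list: (group_id, keywords, attribute)
def pvRules : List (Int × List String × String) :=
  [ (0, (["outdoor", "street", "park", "beach"], "natural_lighting")),
    (0, (["indoor", "room", "office"], "artificial_lighting")),
    (1, (["commercial", "store", "shop", "restaurant"], "commercial")),
    (1, (["residential", "home", "living", "bedroom"], "residential")),
    (1, (["office", "conference", "meeting"], "workplace")),
    (1, (["recreation", "park", "playground", "stadium"], "recreational")),
    (1, (["educational", "school", "library", "classroom"], "educational")),
    (2, (["open", "field", "plaza", "stadium"], "open_space")),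
    (2, (["enclosed", "room", "interior"], "enclosed_space")) ]

def infer_scene_attributes_py_alt (scene_class : String) : List String :=
  let scene_lower := PySem.Str.lower scene_class
  -- stage 1: collect every matching rule (no short-circuit)
  let matched := (pvRules.filter (fun r => r.2.1.any (fun k => PySem.Str.isIn k scene_lower))).map
    (fun r => (r.1, r.2.2))
  -- stage 2: dedupe by group id with a seen-set, keeping the first (highest-priority) per group
  (matched.foldl (fun (acc : PySem.Set Int × List String) p =>
      if PySem.Set.contains acc.1 p.1 then acc
      else (PySem.Set.add acc.1 p.1, acc.2 ++ [p.2]))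
    (PySem.Set.empty, [])).2

-- ===== PRECONDITION & SPEC =====
def Spec_infer_scene_attributes_py (scene_class : String) (out : List String) : Prop := out = infer_scene_attributes_py_alt scene_class
instance (scene_class : String) (out : List String) : Decidable (Spec_infer_scene_attributes_py scene_class out) := by unfold Spec_infer_scene_attributes_py; infer_instance

-- ===== CLAIM (what is proved, stated in full; the proofs are below) =====
def Claim_equal_infer_scene_attributes_py : Prop := ∀ (scene_class : String), Dom_infer_scene_attributes_py scene_class → Spec_infer_scene_attributes_py scene_class (infer_scene_attributes_py scene_class)

-- ===== LEMMAS AND PROOFS =====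

-- ===== VERDICT (by name: the statement is the Claim_ definition above) =====
theorem infer_scene_attributes_py_spec : Claim_equal_infer_scene_attributes_py := by
  intro scene_class _
  unfold Spec_infer_scene_attributes_py infer_scene_attributes_py infer_scene_attributes_py_alt pvRules
  simp only [List.filter]
  generalize (["outdoor", "street", "park", "beach"].any fun k => PySem.Str.isIn k (PySem.Str.lower scene_class)) = b1
  generalize (["indoor", "room", "office"].any fun k => PySem.Str.isIn k (PySem.Str.lower scene_class)) = b2
  generalize (["commercial", "store", "shop", "restaurant"].any fun k => PySem.Str.isIn k (PySem.Str.lower scene_class)) = b3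
  generalize (["residential", "home", "living", "bedroom"].any fun k => PySem.Str.isIn k (PySem.Str.lower scene_class)) = b4
  generalize (["office", "conference", "meeting"].any fun k => PySem.Str.isIn k (PySem.Str.lower scene_class)) = b5
  generalize (["recreation", "park", "playground", "stadium"].any fun k => PySem.Str.isIn k (PySem.Str.lower scene_class)) = b6
  generalize (["educational", "school", "library", "classroom"].any fun k => PySem.Str.isIn k (PySem.Str.lower scene_class)) = b7
  generalize (["open", "field", "plaza", "stadium"].any fun k => PySem.Str.isIn k (PySem.Str.lower scene_class)) = b8
  generalize (["enclosed", "room", "interior"].any fun k => PySem.Str.isIn k (PySem.Str.lower scene_class)) = b9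
  cases b1 <;> cases b2 <;> cases b3 <;> cases b4 <;> cases b5 <;> cases b6 <;> cases b7 <;>
    cases b8 <;> cases b9 <;> rfl
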